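-- pv_equiv track=rewrite | github.com/timeatlas/backend | wiki_template.py | locate_template_starts
-- ===== SOURCE A (Python) =====
-- def locate_template_starts(page):
--   result = []
--   for start in range(len(page)): # if pattern goes out of string, substring would be shorter than '{{' and thus inequal to it
--     if (page[start : start + 2] == '{{'):
--       if (page[start : start + 3] != '{{{'):
--         if (start == 0) or (start > 0 and page[start - 1: start + 2] != '{{{'):
--           result.append(start)
--   return result
-- ===== SOURCE B (Python) =====
-- def locate_template_starts(page):
--     # scan maximal runs of '{'; a run of exactly two braces is a template start
--     result = []
--     i = 0
--     n = len(page)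
--     while i < n:
--         if page[i] == '{':
--             j = i + 1
--             while j < n and page[j] == '{':
--                 j += 1
--             if j - i == 2:
--                 result.append(i)
--             i = j
--         else:
--             i += 1
--     return result
-- ===== Notes on version B (the rewrite author's own statement) =====
-- stated objective: alternative
-- what changed: B scans maximal runs of '{' once (emitting the start of each run of exactly two) instead of A's per-index triple slice comparisons.
import Mathlib
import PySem

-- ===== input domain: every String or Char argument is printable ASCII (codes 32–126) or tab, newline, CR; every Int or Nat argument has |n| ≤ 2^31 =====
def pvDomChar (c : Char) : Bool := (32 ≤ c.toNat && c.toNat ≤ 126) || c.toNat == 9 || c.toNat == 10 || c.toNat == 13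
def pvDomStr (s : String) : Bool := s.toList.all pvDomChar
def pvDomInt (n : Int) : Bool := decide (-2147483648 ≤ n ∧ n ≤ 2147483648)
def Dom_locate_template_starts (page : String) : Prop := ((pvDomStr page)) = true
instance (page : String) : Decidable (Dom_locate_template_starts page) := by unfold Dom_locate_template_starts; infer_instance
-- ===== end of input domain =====

-- B replaces A's per-index triple slice comparisons by a single scan over maximal runs
-- of '{' (a run of exactly two braces is a template start): alternative algorithm, same cost.

-- ===== PORT A =====
def locate_template_starts (page : String) : List Int :=
  (PySem.List.pyRange 0 (page.toList.length : Int) 1).foldl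
    (fun result start =>
      if PySem.List.slice page.toList (some start) (some (start + 2)) = ['{', '{'] then
        if PySem.List.slice page.toList (some start) (some (start + 3)) ≠ ['{', '{', '{'] then
          if start = 0 ∨ (start > 0 ∧ PySem.List.slice page.toList (some (start - 1)) (some (start + 2)) ≠ ['{', '{', '{'])
          then result ++ [start] else result
        else result
      else result) []

-- ===== PORT B =====
-- inner while loop of Source B: length of the leading run of '{'
def pvRunLen : List Char → Nat
  | [] => 0
  | c :: cs => if c = '{' then pvRunLen cs + 1 else 0

-- outer while loop of Source B: current position k, skip a whole brace run at once
def pvBAux : List Char → Int → List Int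
  | [], _ => []
  | c :: cs, k =>
    if c = '{' then
      let r := pvRunLen cs + 1
      (if r = 2 then [k] else []) ++ pvBAux (cs.drop (r - 1)) (k + (r : Int))
    else pvBAux cs (k + 1)
termination_by l _ => l.length
decreasing_by all_goals simp

def locate_template_starts_alt (page : String) : List Int :=
  pvBAux page.toList 0

-- ===== PRECONDITION & SPEC =====
def Spec_locate_template_starts (page : String) (out : List Int) : Prop := out = locate_template_starts_alt page
instance (page : String) (out : List Int) : Decidable (Spec_locate_template_starts page out) := by unfold Spec_locate_template_starts; infer_instance

-- ===== CLAIM (what is proved, stated in full; the proofs are below) =====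
def Claim_equal_locate_template_starts : Prop := ∀ (page : String), Dom_locate_template_starts page → Spec_locate_template_starts page (locate_template_starts page)

-- ===== LEMMAS AND PROOFS =====

-- position i carries a template start: '{{' at i, no '{' directly before or after
def pvGood (l : List Char) (i : Nat) : Bool :=
  (l[i]? == some '{') && (l[i+1]? == some '{') && !(l[i+2]? == some '{') &&
  ((i == 0) || !(l[i-1]? == some '{'))

-- the common characterization: good positions of l, offset by k
def pvSpecList (l : List Char) (k : Int) : List Int :=
  ((List.range l.length).filter (fun i => pvGood l i)).map (fun (i : Nat) => k + (i : Int))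

theorem pvTake2 (d : List Char) : d.take 2 = ['{', '{'] ↔ d[0]? = some '{' ∧ d[1]? = some '{' := by
  match d with
  | [] => simp
  | [a] => simp
  | a :: b :: t => simp [List.take_succ_cons, and_comm]

theorem pvTake3 (d : List Char) :
    d.take 3 = ['{', '{', '{'] ↔ d[0]? = some '{' ∧ d[1]? = some '{' ∧ d[2]? = some '{' := by
  match d with
  | [] => simp
  | [a] => simp
  | [a, b] => simp
  | a :: b :: c :: t => constructor <;> (intro h; simp_all [List.take_succ_cons])

theorem pvCond (l : List Char) (i : Nat) (acc : List Int) :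
    (if PySem.List.slice l (some (i : Int)) (some ((i : Int) + 2)) = ['{', '{'] then
       if PySem.List.slice l (some (i : Int)) (some ((i : Int) + 3)) ≠ ['{', '{', '{'] then
         if ((i : Int) = 0 ∨ ((i : Int) > 0 ∧ PySem.List.slice l (some ((i : Int) - 1)) (some ((i : Int) + 2)) ≠ ['{', '{', '{']))
         then acc ++ [(i : Int)] else acc
       else acc
     else acc) = if pvGood l i then acc ++ [(i : Int)] else acc := by
  have e2 : ((i : Int) + 2) = ((i + 2 : Nat) : Int) := by push_cast; ring
  have e3 : ((i : Int) + 3) = ((i + 3 : Nat) : Int) := by push_cast; ring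
  rw [e2, e3, PySem.List.slice_natCast, PySem.List.slice_natCast]
  have f2 : i + 2 - i = 2 := by omega
  have f3 : i + 3 - i = 3 := by omega
  rw [f2, f3]
  have t2 : ((l.drop i).take 2 = ['{', '{']) ↔ (l[i]? = some '{' ∧ l[i+1]? = some '{') := by
    rw [pvTake2]; simp [List.getElem?_drop]
  have t3 : ((l.drop i).take 3 = ['{', '{', '{']) ↔
      (l[i]? = some '{' ∧ l[i+1]? = some '{' ∧ l[i+2]? = some '{') := by
    rw [pvTake3]; simp [List.getElem?_drop]
  by_cases hb0 : l[i]? = some '{'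
  · by_cases hb1 : l[i+1]? = some '{'
    · by_cases hb2 : l[i+2]? = some '{'
      · simp [t2, t3, hb0, hb1, hb2, pvGood]
      · rcases Nat.eq_zero_or_pos i with hi | hi
        · subst hi
          simp only [List.drop_zero] at t2 t3
          simp [t2, t3, hb0, hb1, hb2, pvGood]
        · have e1 : ((i : Int) - 1) = ((i - 1 : Nat) : Int) := by omega
          rw [e1, PySem.List.slice_natCast]
          have f1 : i + 2 - (i - 1) = 3 := by omega
          rw [f1]
          have g1 : i - 1 + 1 = i := by omega
          have g2 : i - 1 + 2 = i + 1 := by omega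
          have t3' : ((l.drop (i-1)).take 3 = ['{', '{', '{']) ↔
              (l[i-1]? = some '{' ∧ l[i]? = some '{' ∧ l[i+1]? = some '{') := by
            rw [pvTake3]; simp only [List.getElem?_drop, Nat.add_zero, g1, g2]
          have hne : i ≠ 0 := by omega
          by_cases hbm : l[i-1]? = some '{' <;>
            simp [t2, t3, t3', hb0, hb1, hb2, hbm, pvGood, hne]
    · simp [t2, hb1, pvGood]
  · simp [t2, hb0, pvGood]

theorem pvA_eq (page : String) : locate_template_starts page = pvSpecList page.toList 0 := by
  unfold locate_template_starts
  rw [PySem.List.pyRange_one]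
  simp only [sub_zero, Int.toNat_natCast, zero_add]
  rw [List.foldl_map]
  simp only [pvCond]
  rw [PySem.List.foldl_append_if]
  simp [pvSpecList]

theorem pvRunLen_le (l : List Char) : pvRunLen l ≤ l.length := by
  induction l with
  | nil => simp [pvRunLen]
  | cons c cs ih =>
    by_cases hc : c = '{'
    · simp [pvRunLen, hc]; omega
    · simp [pvRunLen, hc]

theorem pvRunLen_lt (l : List Char) (j : Nat) (hj : j < pvRunLen l) : l[j]? = some '{' := by
  induction l generalizing j with
  | nil => simp [pvRunLen] at hj
  | cons c cs ih =>
    by_cases hc : c = '{'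
    · cases j with
      | zero => simp [hc]
      | succ j =>
        simp only [pvRunLen, hc, if_pos] at hj
        simpa using ih j (by omega)
    · simp [pvRunLen, hc] at hj

theorem pvRunLen_end (l : List Char) : l[pvRunLen l]? ≠ some '{' := by
  induction l with
  | nil => simp [pvRunLen]
  | cons c cs ih =>
    by_cases hc : c = '{'
    · simp only [pvRunLen, hc, if_pos, List.getElem?_cons_succ]
      exact ih
    · simp [pvRunLen, hc]

theorem pvGood_cons_succ (c : Char) (cs : List Char) (i : Nat) (h : i = 0 → c ≠ '{') :
    pvGood (c :: cs) (i+1) = pvGood cs i := by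
  cases i with
  | zero => have hc := h rfl; simp [pvGood, hc]
  | succ n => simp [pvGood]

theorem pvGood_drop (l : List Char) (r i : Nat) (hend : l[r]? ≠ some '{') (hri : r ≤ i) :
    pvGood l i = pvGood (l.drop r) (i - r) := by
  rcases eq_or_lt_of_le hri with rfl | hlt
  · simp [pvGood, List.getElem?_drop, hend]
  · obtain ⟨j, rfl⟩ : ∃ j, i = r + (j+1) := ⟨i - r - 1, by omega⟩
    simp only [pvGood, List.getElem?_drop]
    have h1 : r + (j+1) - r = j + 1 := by omega
    rw [h1]
    have n0 : (r + (j+1) == 0) = false := by simp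
    have n1 : ((j+1) == 0) = false := by simp
    rw [n0, n1]
    have a0 : r + (j+1) - 1 = r + j := by omega
    have a1 : r + (j+1) + 1 = r + (j+1+1) := by omega
    have a2 : r + (j+1) + 2 = r + (j+1+2) := by omega
    rw [a0, a1, a2]
    simp

theorem pvSpec_cons (c : Char) (cs : List Char) (k : Int) (hc : c ≠ '{') :
    pvSpecList (c :: cs) k = pvSpecList cs (k+1) := by
  unfold pvSpecList
  have h0 : pvGood (c :: cs) 0 = false := by simp [pvGood, hc]
  rw [show (c :: cs).length = cs.length + 1 from rfl, List.range_succ_eq_map,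
    List.filter_cons]
  simp only [h0, Bool.false_eq_true, ite_false]
  rw [List.filter_map, List.map_map]
  have hg : ((fun i => pvGood (c :: cs) i) ∘ Nat.succ) = fun i => pvGood cs i := by
    funext i
    exact pvGood_cons_succ c cs i (fun _ => hc)
  rw [hg]
  congr 1
  funext i
  simp [Function.comp, Nat.succ_eq_add_one]
  ring

theorem pvFilter_run (l : List Char) (r : Nat) (hr1 : 1 ≤ r)
    (hlt : ∀ j, j < r → l[j]? = some '{') (hend : l[r]? ≠ some '{') :
    (List.range r).filter (fun i => pvGood l i) = if r = 2 then [0] else [] := by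
  match r, hr1 with
  | 1, _ =>
    have h0 : pvGood l 0 = false := by
      have b0 := hlt 0 (by omega)
      simp [pvGood, b0, hend]
    simp [List.range_succ, h0]
  | 2, _ =>
    have h0 : pvGood l 0 = true := by
      have b0 := hlt 0 (by omega)
      have b1 := hlt 1 (by omega)
      simp [pvGood, b0, b1, hend]
    have h1 : pvGood l 1 = false := by
      have b0 := hlt 0 (by omega)
      simp [pvGood, b0]
    simp [List.range_succ, h0, h1]
  | (n+3), _ =>
    rw [List.filter_eq_nil_iff.mpr]
    · simp
    · intro i hi
      rw [List.mem_range] at hi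
      rcases Nat.eq_zero_or_pos i with rfl | hip
      · have b2 := hlt 2 (by omega)
        simp [pvGood, b2]
      · have bm := hlt (i-1) (by omega)
        have hne : i ≠ 0 := by omega
        simp [pvGood, bm, hne]

theorem pvSpec_run (l : List Char) (r : Nat) (k : Int) (hr1 : 1 ≤ r) (hrle : r ≤ l.length)
    (hlt : ∀ j, j < r → l[j]? = some '{') (hend : l[r]? ≠ some '{') :
    pvSpecList l k = (if r = 2 then [k] else []) ++ pvSpecList (l.drop r) (k + (r : Int)) := by
  unfold pvSpecList
  have hsplit : List.range l.length = List.range r ++ (List.range (l.length - r)).map (r + ·) := by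
    conv_lhs => rw [show l.length = r + (l.length - r) by omega]
    exact List.range_add
  rw [hsplit, List.filter_append, List.map_append]
  congr 1
  · rw [pvFilter_run l r hr1 hlt hend]
    split_ifs <;> simp
  · rw [List.filter_map, List.map_map]
    have hg : ((fun i => pvGood l i) ∘ (r + ·)) = fun j => pvGood (l.drop r) j := by
      funext j
      have h := pvGood_drop l r (r+j) hend (by omega)
      have h2 : r + j - r = j := by omega
      rw [h2] at h
      simpa [Function.comp] using h
    rw [hg, List.length_drop]
    congr 1
    funext j
    simp [Function.comp]
    ring

theorem pvB_eq : ∀ (n : Nat) (l : List Char), l.length ≤ n → ∀ k, pvBAux l k = pvSpecList l k := by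
  intro n
  induction n with
  | zero =>
    intro l hl k
    have : l = [] := List.eq_nil_of_length_eq_zero (by omega)
    subst this
    simp [pvBAux, pvSpecList]
  | succ n ih =>
    intro l hl k
    match l with
    | [] => simp [pvBAux, pvSpecList]
    | c :: cs =>
      by_cases hc : c = '{'
      · subst hc
        rw [pvBAux, if_pos rfl]
        have hrl : pvRunLen ('{' :: cs) = pvRunLen cs + 1 := by simp [pvRunLen]
        have hdrop : cs.drop (pvRunLen cs + 1 - 1) = ('{' :: cs).drop (pvRunLen cs + 1) := by simp
        show (if pvRunLen cs + 1 = 2 then [k] else []) ++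
            pvBAux (cs.drop (pvRunLen cs + 1 - 1)) (k + ((pvRunLen cs + 1 : Nat) : Int)) =
          pvSpecList ('{' :: cs) k
        rw [hdrop]
        rw [ih (('{' :: cs).drop (pvRunLen cs + 1)) (by simp at hl ⊢; omega)
          (k + ((pvRunLen cs + 1 : Nat) : Int))]
        rw [pvSpec_run ('{' :: cs) (pvRunLen cs + 1) k (by omega)
          (by have := pvRunLen_le cs; simp at hl ⊢; omega)
          (fun j hj => pvRunLen_lt ('{' :: cs) j (by rw [hrl]; omega))
          (by rw [← hrl]; exact pvRunLen_end ('{' :: cs))]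
      · rw [pvBAux]
        rw [if_neg hc]
        rw [ih cs (by simp at hl; omega) (k+1)]
        rw [pvSpec_cons c cs k hc]

-- ===== VERDICT (by name: the statement is the Claim_ definition above) =====
theorem locate_template_starts_spec : Claim_equal_locate_template_starts := by
  intro page _
  unfold Spec_locate_template_starts locate_template_starts_alt
  rw [pvA_eq, pvB_eq page.toList.length page.toList le_rfl]
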